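-- pv_equiv track=rewrite | github.com/future97/lncRNAIdentification | sequence_attributes_orf.py | createTrip
-- ===== SOURCE A (Python) =====
-- def createTrip(List1):
--     trip = []
--     for i in range(len(List1)):
--         for j in range(len(List1)):
--             for k in range(len(List1)):
--                 item = List1[i] + List1[j] + List1[k]
--                 trip.append(item)
--     return trip
-- ===== SOURCE B (Python) =====
-- def createTrip(List1):
--     n = len(List1)
--     doubles = [List1[i] + List1[j] for i in range(n) for j in range(n)]
--     return [d + List1[k] for d in doubles for k in range(n)]
-- ===== Notes on version B (the rewrite author's own statement) =====
-- stated objective: alternative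
-- what changed: Replaces the triple nested append loop by two comprehension passes: an n^2 table of pairwise concatenations is materialized once and then extended by one more factor, relying on associativity of string concatenation.
import Mathlib
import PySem

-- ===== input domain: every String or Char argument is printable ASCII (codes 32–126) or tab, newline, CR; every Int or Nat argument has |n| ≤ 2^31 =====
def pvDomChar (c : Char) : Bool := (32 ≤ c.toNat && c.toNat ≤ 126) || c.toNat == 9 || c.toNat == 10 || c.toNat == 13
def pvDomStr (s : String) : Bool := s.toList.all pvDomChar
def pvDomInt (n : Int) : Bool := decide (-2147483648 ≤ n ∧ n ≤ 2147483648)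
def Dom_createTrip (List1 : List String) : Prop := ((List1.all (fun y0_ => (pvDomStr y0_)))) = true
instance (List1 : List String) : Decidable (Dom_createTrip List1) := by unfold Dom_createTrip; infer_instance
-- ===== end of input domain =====

-- ===== PORT A =====
-- header: B builds the same n^3 concatenations via a materialized n^2 doubles table (alternative decomposition, same cost)
def createTrip (List1 : List String) : List String :=
  (PySem.List.pyRange 0 (List1.length : Int) 1).foldl (fun trip i =>
    (PySem.List.pyRange 0 (List1.length : Int) 1).foldl (fun trip j =>
      (PySem.List.pyRange 0 (List1.length : Int) 1).foldl (fun trip k =>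
        trip ++ [PySem.List.pyGetD List1 i "" ++ PySem.List.pyGetD List1 j "" ++ PySem.List.pyGetD List1 k ""])
        trip) trip) []

-- ===== PORT B =====
def createTrip_alt (List1 : List String) : List String :=
  let n : Int := List1.length
  let doubles := (PySem.List.pyRange 0 n 1).flatMap (fun i =>
    (PySem.List.pyRange 0 n 1).map (fun j =>
      PySem.List.pyGetD List1 i "" ++ PySem.List.pyGetD List1 j ""))
  doubles.flatMap (fun d =>
    (PySem.List.pyRange 0 n 1).map (fun k => d ++ PySem.List.pyGetD List1 k ""))

-- ===== PRECONDITION & SPEC =====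
def Spec_createTrip (List1 : List String) (out : List String) : Prop := out = createTrip_alt List1
instance (List1 : List String) (out : List String) : Decidable (Spec_createTrip List1 out) := by unfold Spec_createTrip; infer_instance

-- ===== CLAIM (what is proved, stated in full; the proofs are below) =====
def Claim_equal_createTrip : Prop := ∀ (List1 : List String), Dom_createTrip List1 → Spec_createTrip List1 (createTrip List1)

-- ===== LEMMAS AND PROOFS =====

-- ===== VERDICT (by name: the statement is the Claim_ definition above) =====
theorem createTrip_spec : Claim_equal_createTrip := by
  intro List1 _
  unfold Spec_createTrip createTrip createTrip_alt
  simp only [PySem.List.foldl_append_singleton_eq_map, PySem.List.foldl_append_eq_flatMap,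
    List.nil_append, List.flatMap_assoc, List.flatMap_map,
    String.append_assoc]
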